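-- pv_equiv track=rewrite | github.com/aiidateam/aiida-core | aiida/engine/processes/process.py | _get_namespace_list
-- ===== SOURCE A (Python) =====
-- def _get_namespace_list(namespace=None, agglomerate=True):
--     """Get the list of namespaces in a given namespace.
--
--     :param namespace: name space
--     :type namespace: str
--
--     :param agglomerate: If set to true, all parent namespaces of the given ``namespace`` will also
--         be searched.
--     :type agglomerate: bool
--
--     :returns: namespace list
--     :rtype: list
--     """
--     if not agglomerate:
--         return [namespace]
--
--     namespace_list = [None]
--     if namespace is not None:
--         split_ns = namespace.split('.')
--         namespace_list.extend(['.'.join(split_ns[:i]) for i in range(1, len(split_ns) + 1)])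
--     return namespace_list
-- ===== SOURCE B (Python) =====
-- def _get_namespace_list(namespace=None, agglomerate=True):
--     """Get the list of namespaces in a given namespace (single-pass running-prefix version)."""
--     if not agglomerate:
--         return [namespace]
--     result = [None]
--     if namespace is not None:
--         prefix = None
--         for segment in namespace.split('.'):
--             prefix = segment if prefix is None else prefix + '.' + segment
--             result.append(prefix)
--     return result
-- ===== Notes on version B (the rewrite author's own statement) =====
-- stated objective: alternative
-- what changed: Replaces the comprehension that recomputes the joined prefix of the first i segments for every i with a single pass over the segments that maintains a running prefix string, appending it after each step.
import Mathlib
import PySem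

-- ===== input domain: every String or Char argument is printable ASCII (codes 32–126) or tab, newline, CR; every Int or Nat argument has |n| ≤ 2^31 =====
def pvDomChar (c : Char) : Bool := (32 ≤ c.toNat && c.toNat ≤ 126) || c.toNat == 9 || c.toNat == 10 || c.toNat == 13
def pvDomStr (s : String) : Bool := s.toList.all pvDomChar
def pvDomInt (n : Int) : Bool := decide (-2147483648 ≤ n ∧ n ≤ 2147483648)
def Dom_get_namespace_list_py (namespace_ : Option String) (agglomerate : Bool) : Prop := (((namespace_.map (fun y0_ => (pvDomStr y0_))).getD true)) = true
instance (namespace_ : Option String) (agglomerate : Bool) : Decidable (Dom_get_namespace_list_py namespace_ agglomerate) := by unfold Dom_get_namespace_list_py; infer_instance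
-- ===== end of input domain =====

-- B builds the prefix list in one pass with a running prefix instead of re-joining split_ns[:i] for each i (alternative decomposition, same cost in practice).


-- ===== PORT A =====
def get_namespace_list_py (namespace_ : Option String) (agglomerate : Bool) : List (Option String) :=
  if agglomerate = false then [namespace_]
  else
    let namespace_list : List (Option String) := [none]
    match namespace_ with
    | none => namespace_list
    | some ns =>
      -- split_ns = namespace.split('.'); sep "." ≠ "" so split? is always `some`
      let split_ns : List String := (PySem.Str.split? ns ".").getD []
      namespace_list ++
        ((PySem.List.pyRange 1 ((split_ns.length : Int) + 1) 1).map
          (fun i => some (PySem.Str.join "." (PySem.List.slice split_ns none (some i)))))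

-- ===== PORT B =====
-- the for-loop of Source B: running prefix, appending it after each segment
def pvAltLoop (segs : List String) (prefix? : Option String) (acc : List (Option String)) : List (Option String) :=
  match segs with
  | [] => acc
  | seg :: rest =>
    let p := match prefix? with
      | none => seg
      | some q => q ++ "." ++ seg
    pvAltLoop rest (some p) (acc ++ [some p])

def get_namespace_list_py_alt (namespace_ : Option String) (agglomerate : Bool) : List (Option String) :=
  if agglomerate = false then [namespace_]
  else
    match namespace_ with
    | none => [none]
    | some ns => pvAltLoop ((PySem.Str.split? ns ".").getD []) none [none]

-- ===== PRECONDITION & SPEC =====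
def Spec_get_namespace_list_py (namespace_ : Option String) (agglomerate : Bool) (out : List (Option String)) : Prop := out = get_namespace_list_py_alt namespace_ agglomerate
instance (namespace_ : Option String) (agglomerate : Bool) (out : List (Option String)) : Decidable (Spec_get_namespace_list_py namespace_ agglomerate out) := by unfold Spec_get_namespace_list_py; infer_instance

-- ===== CLAIM (what is proved, stated in full; the proofs are below) =====
def Claim_equal_get_namespace_list_py : Prop := ∀ (namespace_ : Option String) (agglomerate : Bool), Dom_get_namespace_list_py namespace_ agglomerate → Spec_get_namespace_list_py namespace_ agglomerate (get_namespace_list_py namespace_ agglomerate)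

-- ===== LEMMAS AND PROOFS =====

-- '.'.join is left-shiftable: join((p+'.'+s) :: xs) = join(p :: s :: xs)
theorem pv_join_shift (p seg : String) (xs : List String) :
    PySem.Str.join "." ((p ++ "." ++ seg) :: xs) = PySem.Str.join "." (p :: seg :: xs) := by
  have h : (PySem.Str.join "." ((p ++ "." ++ seg) :: xs)).toList
        = (PySem.Str.join "." (p :: seg :: xs)).toList := by
    cases xs with
    | nil =>
        simp [PySem.Str.toList_join, PySem.Chars.join_singleton, PySem.Chars.join_cons_cons]
    | cons x xs' =>
        simp [PySem.Str.toList_join, PySem.Chars.join_cons_cons]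
  exact String.toList_inj.mp h

-- invariant of Source B's loop once the prefix is set
theorem pvAltLoop_some (segs : List String) :
    ∀ (p : String) (acc : List (Option String)),
    pvAltLoop segs (some p) acc
      = acc ++ (List.range segs.length).map
          (fun k => some (PySem.Str.join "." (p :: segs.take (k + 1)))) := by
  induction segs with
  | nil => intro p acc; simp [pvAltLoop]
  | cons seg rest ih =>
      intro p acc
      simp only [pvAltLoop]
      rw [ih (p ++ "." ++ seg) (acc ++ [some (p ++ "." ++ seg)])]
      rw [List.length_cons, List.range_succ_eq_map, List.map_cons, List.map_map]
      simp only [List.take_succ_cons, List.take_zero]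
      have h0 : PySem.Str.join "." [p, seg] = p ++ "." ++ seg := by
        have : (PySem.Str.join "." [p, seg]).toList = (p ++ "." ++ seg).toList := by
          simp [PySem.Str.toList_join, PySem.Chars.join_cons_cons, PySem.Chars.join_singleton]
        exact String.toList_inj.mp this
      rw [h0]
      have hfun : (List.map (fun k => some (PySem.Str.join "." ((p ++ "." ++ seg) :: rest.take (k + 1)))) (List.range rest.length))
            = (List.map (fun k => some (PySem.Str.join "." (p :: seg :: rest.take (k + 1)))) (List.range rest.length)) := by
        apply List.map_congr_left; intro k _; rw [pv_join_shift]
      simp [hfun, Function.comp]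

-- Source B's loop from the initial None prefix computes A's comprehension (over List.range)
theorem pvAltLoop_eq (segs : List String) :
    pvAltLoop segs none [none]
      = none :: (List.range segs.length).map
          (fun k => some (PySem.Str.join "." (segs.take (k + 1)))) := by
  cases segs with
  | nil => simp [pvAltLoop]
  | cons seg rest =>
      simp only [pvAltLoop]
      rw [pvAltLoop_some rest seg ([none] ++ [some seg])]
      rw [List.length_cons, List.range_succ_eq_map, List.map_cons, List.map_map]
      simp [Function.comp, PySem.Str.join, PySem.Chars.join_singleton]

-- A's pyRange/slice comprehension, rewritten over List.range and List.take
theorem pvA_map_eq (segs : List String) :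
    (PySem.List.pyRange 1 ((segs.length : Int) + 1) 1).map
        (fun i => some (PySem.Str.join "." (PySem.List.slice segs none (some i))))
      = (List.range segs.length).map
          (fun k => some (PySem.Str.join "." (segs.take (k + 1)))) := by
  rw [PySem.List.pyRange_one, List.map_map]
  have hlen : (((segs.length : Int) + 1) - 1).toNat = segs.length := by omega
  rw [hlen]
  apply List.map_congr_left
  intro k _
  simp only [Function.comp]
  have h1 : (1 : Int) + (k : Int) = ((k + 1 : Nat) : Int) := by push_cast; ring
  rw [h1, PySem.List.slice_to_natCast]

theorem get_namespace_list_py_eq (namespace_ : Option String) (agglomerate : Bool) :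
    get_namespace_list_py namespace_ agglomerate
      = get_namespace_list_py_alt namespace_ agglomerate := by
  unfold get_namespace_list_py get_namespace_list_py_alt
  cases agglomerate with
  | false => rfl
  | true =>
      simp only [Bool.true_eq_false, if_false]
      cases namespace_ with
      | none => rfl
      | some ns =>
          simp only
          rw [pvAltLoop_eq, pvA_map_eq]
          rfl

-- ===== VERDICT (by name: the statement is the Claim_ definition above) =====
theorem get_namespace_list_py_spec : Claim_equal_get_namespace_list_py := by
  intro namespace_ agglomerate _
  unfold Spec_get_namespace_list_py
  exact get_namespace_list_py_eq namespace_ agglomerate
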